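-- pv_equiv track=rewrite | github.com/Evvard/Modules.py | Day05/ex0/ stream_processor.py | process
-- ===== SOURCE A (Python) =====
-- from typing import Any
--
-- def process(data: Any) -> str:
--     i = 0
--     word = 0
--     while i < len(data):
--         if data[0] != ' ' and i == 0:
--             word += 1
--         elif data[i - 1] == ' ' and data[i] != ' ':
--             word += 1
--         i += 1
--     return f" text: {len(data)} characters, {word} words"
-- ===== SOURCE B (Python) =====
-- def process(data):
--     word = sum(1 for w in data.split(' ') if w)
--     return f" text: {len(data)} characters, {word} words"
-- ===== Notes on version B (the rewrite author's own statement) =====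
-- stated objective: idiomatic
-- what changed: Replaces the index-based while loop with look-back comparisons by splitting the string on the single-space separator and counting the nonempty pieces.
import Mathlib
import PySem

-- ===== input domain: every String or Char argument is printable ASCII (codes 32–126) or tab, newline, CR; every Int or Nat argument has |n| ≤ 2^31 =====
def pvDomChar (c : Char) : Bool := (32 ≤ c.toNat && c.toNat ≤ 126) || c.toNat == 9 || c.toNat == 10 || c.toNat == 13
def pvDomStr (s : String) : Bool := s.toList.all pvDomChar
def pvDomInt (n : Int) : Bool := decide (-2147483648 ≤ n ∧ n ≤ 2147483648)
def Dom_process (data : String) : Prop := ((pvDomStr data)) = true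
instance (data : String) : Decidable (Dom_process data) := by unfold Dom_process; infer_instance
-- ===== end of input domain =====

-- B replaces A's index-based while loop (look-back comparisons) by splitting on ' ' and
-- counting the nonempty pieces; same result, more idiomatic.


-- ===== PORT A =====
-- A's while loop: i runs over 0..len-1; every index Python reads (0, i, i-1 — where
-- i-1 is the negative index -1 when i = 0, reading the LAST character) is in range
-- because the loop body only runs on a nonempty string, so pyGetD is exact here.
def processLoop (cs : List Char) (i : Nat) (word : Nat) : Nat :=
  if _h : i < cs.length then
    processLoop cs (i + 1)
      (if PySem.List.pyGetD cs 0 ' ' ≠ ' ' ∧ i = 0 then word + 1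
       else if PySem.List.pyGetD cs ((i : Int) - 1) ' ' = ' ' ∧
               PySem.List.pyGetD cs (i : Int) ' ' ≠ ' ' then word + 1
       else word)
  else word
  termination_by cs.length - i

def process (data : String) : String :=
  " text: " ++ PySem.Int.toStr (data.toList.length : Int) ++ " characters, " ++
    PySem.Int.toStr ((processLoop data.toList 0 0 : Nat) : Int) ++ " words"

-- ===== PORT B =====
def process_alt (data : String) : String :=
  " text: " ++ PySem.Int.toStr (data.toList.length : Int) ++ " characters, " ++
    PySem.Int.toStr (((PySem.Chars.splitOn data.toList [' ']).foldl
      (fun acc w => if w ≠ [] then acc + 1 else acc) 0 : Nat) : Int) ++ " words"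

-- ===== PRECONDITION & SPEC =====
def Spec_process (data : String) (out : String) : Prop := out = process_alt data
instance (data : String) (out : String) : Decidable (Spec_process data out) := by unfold Spec_process; infer_instance

-- ===== CLAIM (what is proved, stated in full; the proofs are below) =====
def Claim_equal_process : Prop := ∀ (data : String), Dom_process data → Spec_process data (process data)

-- ===== LEMMAS AND PROOFS =====

-- word count with the "previous character was a space (or start of string)" state
def wcount : List Char → Bool → Nat
  | [], _ => 0
  | c :: cs, prev => (if prev = true ∧ c ≠ ' ' then 1 else 0) + wcount cs (c == ' ')

def prevOf (pre : List Char) : Bool :=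
  match pre.getLast? with
  | none => true
  | some c => c == ' '

theorem getD_append_cons (pre suf : List Char) (c d : Char) :
    (pre ++ c :: suf).getD pre.length d = c := by
  induction pre with
  | nil => rfl
  | cons a pre ih => simpa [List.getD] using ih

theorem loopA_eq (suf : List Char) : ∀ (pre : List Char) (w : Nat),
    processLoop (pre ++ suf) pre.length w = w + wcount suf (prevOf pre) := by
  induction suf with
  | nil =>
    intro pre w
    unfold processLoop
    simp [wcount]
  | cons c rest ih =>
    intro pre w
    unfold processLoop
    have hlt : pre.length < (pre ++ c :: rest).length := by simp
    rw [dif_pos hlt]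
    rcases pre.eq_nil_or_concat with rfl | ⟨p, a, rfl⟩
    · -- i = 0 : Python's first branch (data[0] != ' ' and i == 0)
      by_cases hc : c = ' '
      · rw [if_neg (by simp [PySem.List.pyGetD_zero_cons, hc]),
           if_neg (by simp [PySem.List.pyGetD_zero_cons, hc])]
        have hih := ih [c] w
        simp only [List.singleton_append, List.length_cons, List.length_nil,
          List.nil_append] at hih ⊢
        rw [hih]
        simp [wcount, prevOf, hc]
      · rw [if_pos (by refine ⟨?_, by simp⟩; simp [PySem.List.pyGetD_zero_cons, hc])]
        have hih := ih [c] (w + 1)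
        simp only [List.singleton_append, List.length_cons, List.length_nil,
          List.nil_append] at hih ⊢
        rw [hih]
        simp [wcount, prevOf, hc]
        omega
    · -- i = pre.length ≥ 1 : Python's elif branch (data[i-1] == ' ' and data[i] != ' ')
      simp only [List.concat_eq_append] at *
      have hprev : PySem.List.pyGetD ((p ++ [a]) ++ c :: rest) (((p ++ [a]).length : Int) - 1) ' ' = a := by
        have h1 : (((p ++ [a]).length : Int) - 1) = ((p.length : Nat) : Int) := by
          simp
        rw [h1, PySem.List.pyGetD_natCast]
        have h2 : (p ++ [a]) ++ c :: rest = p ++ a :: (c :: rest) := by simp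
        rw [h2]
        exact getD_append_cons p (c :: rest) a ' '
      have hcur : PySem.List.pyGetD ((p ++ [a]) ++ c :: rest) (((p ++ [a]).length : Int)) ' ' = c := by
        rw [PySem.List.pyGetD_natCast]
        exact getD_append_cons (p ++ [a]) rest c ' '
      have hpo : prevOf (p ++ [a]) = (a == ' ') := by simp [prevOf]
      have hclean : ∀ w' : Nat,
          processLoop ((p ++ [a]) ++ c :: rest) ((p ++ [a]).length + 1) w'
            = w' + wcount rest (c == ' ') := by
        intro w'
        have hih := ih ((p ++ [a]) ++ [c]) w'
        have hlen : ((p ++ [a]) ++ [c]).length = (p ++ [a]).length + 1 := by simp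
        have hassoc : ((p ++ [a]) ++ [c]) ++ rest = (p ++ [a]) ++ c :: rest := by simp
        have hpo' : prevOf ((p ++ [a]) ++ [c]) = (c == ' ') := by simp [prevOf]
        rw [hlen, hassoc, hpo'] at hih
        exact hih
      rw [if_neg (by simp)]
      by_cases ha : a = ' ' <;> by_cases hc : c = ' '
      · rw [if_neg (by rw [hprev, hcur]; simp [hc])]
        rw [hclean w]
        simp [wcount, prevOf, ha, hc]
      · rw [if_pos (by rw [hprev, hcur]; exact ⟨by rw [ha], hc⟩)]
        rw [hclean (w + 1)]
        simp [wcount, prevOf, ha, hc]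
        omega
      · rw [if_neg (by rw [hprev, hcur]; simp [ha])]
        rw [hclean w]
        simp [wcount, prevOf, ha, hc]
      · rw [if_neg (by rw [hprev, hcur]; simp [ha])]
        rw [hclean w]
        simp [wcount, prevOf, ha, hc]

-- the fold in B counts the nonempty pieces
theorem foldl_count_nonempty (pieces : List (List Char)) : ∀ (n : Nat),
    pieces.foldl (fun acc w => if w ≠ [] then acc + 1 else acc) n
      = n + pieces.countP (fun w => !w.isEmpty) := by
  induction pieces with
  | nil => intro n; simp
  | cons p ps ih =>
    intro n
    by_cases hp : p = []
    · rw [List.foldl_cons, if_neg (by simp [hp]), ih n]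
      simp [List.countP_cons, hp]
    · rw [List.foldl_cons, if_pos hp, ih (n + 1)]
      simp [List.countP_cons, hp]
      omega

theorem countP_go (l : List Char) : ∀ (fuel : Nat) (cur : List Char) (acc : List (List Char)),
    l.length < fuel →
    (PySem.Chars.splitOn.go [' '] fuel l cur acc).countP (fun w => !w.isEmpty)
      = acc.countP (fun w => !w.isEmpty) + (if cur = [] then 0 else 1) + wcount l cur.isEmpty := by
  induction l with
  | nil =>
    intro fuel cur acc hf
    obtain ⟨f, rfl⟩ : ∃ f, fuel = f + 1 := ⟨fuel - 1, by omega⟩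
    by_cases hcur : cur = [] <;>
      simp [PySem.Chars.splitOn.go, wcount, hcur, List.countP_cons]
  | cons c rest ih =>
    intro fuel cur acc hf
    obtain ⟨f, rfl⟩ : ∃ f, fuel = f + 1 := ⟨fuel - 1, by omega⟩
    have hf' : rest.length < f := by simpa using hf
    by_cases hc : c = ' '
    · subst hc
      have hpre : ([' '] : List Char).isPrefixOf (' ' :: rest) = true := by
        simp [List.isPrefixOf]
      rw [PySem.Chars.splitOn.go, if_pos hpre]
      simp only [List.length_singleton, List.drop_one, List.tail_cons]
      rw [ih f [] (cur.reverse :: acc) hf']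
      by_cases hcur : cur = [] <;>
        simp [hcur, wcount, List.countP_cons, Nat.add_assoc, Nat.add_comm]
    · have hpre : ([' '] : List Char).isPrefixOf (c :: rest) = false := by
        simp [List.isPrefixOf]
        exact fun h => hc h.symm
      rw [PySem.Chars.splitOn.go, if_neg (by simp [hpre])]
      rw [ih f (c :: cur) acc (by omega)]
      by_cases hcur : cur = [] <;>
        simp [hcur, wcount, hc, Nat.add_assoc,
          show (c == ' ') = false from beq_eq_false_iff_ne.mpr hc]

theorem count_splitOn (cs : List Char) :
    (PySem.Chars.splitOn cs [' ']).countP (fun w => !w.isEmpty) = wcount cs true := by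
  unfold PySem.Chars.splitOn
  rw [countP_go cs (cs.length + 1) [] [] (by omega)]
  simp

theorem loopA_eq_wcount (cs : List Char) : processLoop cs 0 0 = wcount cs true := by
  have := loopA_eq cs [] 0
  simpa [prevOf] using this

-- ===== VERDICT (by name: the statement is the Claim_ definition above) =====
theorem process_spec : Claim_equal_process := by
  intro data _
  unfold Spec_process process process_alt
  rw [foldl_count_nonempty, count_splitOn, loopA_eq_wcount, Nat.zero_add]
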